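-- pv_equiv track=rewrite | github.com/Arsen1302/Code-copy-detector | TestData/solutions/problem_518_1.py | solution_518_1
-- ===== SOURCE A (Python) =====
-- def solution_518_1(s):
--     s += " "
--
--     streak, char, out = 0, s[0], []
--
--     for i,c in enumerate(s):
--         if c != char:
--             if streak >= 3:
--                 out.append([i-streak, i-1])
--
--             streak, char = 0, s[i]
--
--         streak += 1
--
--     return out
-- ===== SOURCE B (Python) =====
-- def solution_518_1(s):
--     s += " "
--     # boundary positions: 0 plus every index where the char differs from its predecessor
--     b = [0] + [i for i, (p, c) in enumerate(zip(s, s[1:]), 1) if p != c]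
--     # each run is a pair of consecutive boundaries; the final run (holding the sentinel) has no pair
--     return [[st, en - 1] for st, en in zip(b, b[1:]) if en - st >= 3]
-- ===== Notes on version B (the rewrite author's own statement) =====
-- stated objective: alternative
-- what changed: A counts a running streak in a stateful sentinel scan; B builds the list of run boundary positions (0 plus every index whose char differs from its predecessor) and emits a range for each consecutive boundary pair of distance >= 3, the zip naturally dropping the final sentinel run.
import Mathlib
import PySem

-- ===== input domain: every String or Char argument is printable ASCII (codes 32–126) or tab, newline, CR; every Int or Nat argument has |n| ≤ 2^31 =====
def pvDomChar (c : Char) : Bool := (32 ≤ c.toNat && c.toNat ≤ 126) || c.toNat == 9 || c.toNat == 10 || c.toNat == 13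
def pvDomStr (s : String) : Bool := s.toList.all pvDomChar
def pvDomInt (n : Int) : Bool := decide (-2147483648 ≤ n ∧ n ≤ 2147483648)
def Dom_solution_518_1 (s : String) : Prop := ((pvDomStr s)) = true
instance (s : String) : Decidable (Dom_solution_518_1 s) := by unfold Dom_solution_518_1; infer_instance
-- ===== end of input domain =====

-- B replaces A's streak-counter scan by a boundary-list decomposition (zip of consecutive
-- boundaries filtered by run length); objective: idiomatic/alternative, same cost.

-- ===== PORT A =====
-- A's loop body, named so the foldl lemma can cite it; 'char = s[i]' is ported as the
-- enumerated char c, which is the same value s[i]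
def pvStepA (acc : Int × Char × List (List Int)) (ic : Int × Char) : Int × Char × List (List Int) :=
  let streak := acc.1; let ch := acc.2.1; let out := acc.2.2
  let i := ic.1; let c := ic.2
  let st' : Int × Char × List (List Int) :=
    if c ≠ ch then
      (0, c, if streak ≥ 3 then out ++ [[i - streak, i - 1]] else out)
    else (streak, ch, out)
  (st'.1 + 1, st'.2.1, st'.2.2)

def solution_518_1 (s : String) : List (List Int) :=
  let cs := (s ++ " ").toList
  let r := (PySem.List.enumerate cs 0).foldl pvStepA (0, cs.headD ' ', [])
  -- s[0]: cs is nonempty (sentinel space), so headD is exact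
  r.2.2

-- ===== PORT B =====
-- the two comprehension bodies of Source B, named as helpers
def pvBndf (p : Int × Char × Char) : Option Int :=
  if p.2.1 ≠ p.2.2 then some p.1 else none

def pvOutf (q : Int × Int) : Option (List Int) :=
  if q.2 - q.1 ≥ 3 then some [q.1, q.2 - 1] else none

def solution_518_1_alt (s : String) : List (List Int) :=
  let cs := (s ++ " ").toList
  let b : List Int := 0 :: ((PySem.List.enumerate (cs.zip cs.tail) 1).filterMap pvBndf)
  (b.zip b.tail).filterMap pvOutf

-- ===== PRECONDITION & SPEC =====
def Spec_solution_518_1 (s : String) (out : List (List Int)) : Prop := out = solution_518_1_alt s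
instance (s : String) (out : List (List Int)) : Decidable (Spec_solution_518_1 s out) := by unfold Spec_solution_518_1; infer_instance

-- ===== CLAIM (what is proved, stated in full; the proofs are below) =====
def Claim_equal_solution_518_1 : Prop := ∀ (s : String), Dom_solution_518_1 s → Spec_solution_518_1 s (solution_518_1 s)

-- ===== LEMMAS AND PROOFS =====

-- what A's loop appends after reaching state (i, streak, ch)
def pvEmit : Int → Int → Char → List Char → List (List Int)
  | _, _, _, [] => []
  | i, streak, ch, c :: rest =>
    if c = ch then pvEmit (i + 1) (streak + 1) ch rest
    else (if streak ≥ 3 then [[i - streak, i - 1]] else []) ++ pvEmit (i + 1) 1 c rest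

-- B's boundary list from position p onwards, previous char prev
def pvBnd : Int → Char → List Char → List Int
  | _, _, [] => []
  | p, prev, c :: rest => if c ≠ prev then p :: pvBnd (p + 1) c rest else pvBnd (p + 1) c rest

-- B's output from a start boundary and the remaining boundaries
def pvPout : Int → List Int → List (List Int)
  | _, [] => []
  | st, b :: bs => (if b - st ≥ 3 then [[st, b - 1]] else []) ++ pvPout b bs

lemma pvStepA_eq (streak : Int) (ch : Char) (out : List (List Int)) (i : Int) (c : Char) :
    pvStepA (streak, ch, out) (i, c) =
      if c = ch then (streak + 1, ch, out)
      else (1, c, if streak ≥ 3 then out ++ [[i - streak, i - 1]] else out) := by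
  by_cases h : c = ch <;> simp [pvStepA, h]

lemma pvFoldlA (cs : List Char) : ∀ (i streak : Int) (ch : Char) (out : List (List Int)),
    ((PySem.List.enumerate cs i).foldl pvStepA (streak, ch, out)).2.2
    = out ++ pvEmit i streak ch cs := by
  induction cs with
  | nil => intro i streak ch out; simp [PySem.List.enumerate_nil, pvEmit]
  | cons c rest ih =>
    intro i streak ch out
    rw [PySem.List.enumerate_cons, List.foldl_cons, pvStepA_eq]
    by_cases h : c = ch
    · rw [if_pos h, ih, pvEmit, if_pos h]
    · rw [if_neg h, ih, pvEmit, if_neg h]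
      by_cases h3 : streak ≥ 3
      · rw [if_pos h3, if_pos h3, List.append_assoc]
      · rw [if_neg h3, if_neg h3, List.nil_append]

lemma pvZipFilt (rest : List Char) : ∀ (prev : Char) (i : Int),
    ((PySem.List.enumerate ((prev :: rest).zip rest) i).filterMap pvBndf)
    = pvBnd i prev rest := by
  induction rest with
  | nil => intro prev i; simp [PySem.List.enumerate_nil, pvBnd]
  | cons c rest ih =>
    intro prev i
    rw [List.zip_cons_cons, PySem.List.enumerate_cons, List.filterMap_cons, ih]
    by_cases h : c = prev
    · simp [pvBndf, pvBnd, h]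
    · rw [pvBnd, if_pos h]
      simp only [pvBndf]
      rw [if_pos (fun hh => h hh.symm)]

lemma pvZipPout (bs : List Int) : ∀ (st : Int),
    (((st :: bs).zip bs).filterMap pvOutf) = pvPout st bs := by
  induction bs with
  | nil => intro st; simp [pvPout]
  | cons b bs ih =>
    intro st
    rw [List.zip_cons_cons, List.filterMap_cons, ih]
    by_cases h : b - st ≥ 3 <;> simp [pvOutf, pvPout, h]

lemma pvCore (cs : List Char) : ∀ (i streak : Int) (ch : Char),
    pvEmit i streak ch cs = pvPout (i - streak) (pvBnd i ch cs) := by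
  induction cs with
  | nil => intro i streak ch; simp [pvEmit, pvBnd, pvPout]
  | cons c rest ih =>
    intro i streak ch
    by_cases h : c = ch
    · have h' : i + 1 - (streak + 1) = i - streak := by ring
      rw [pvEmit, if_pos h, pvBnd, ih]
      simp [h, h']
    · have h1 : i - (i - streak) = streak := by ring
      have h2 : (i : Int) + 1 - 1 = i := by ring
      have hb : pvBnd i ch (c :: rest) = i :: pvBnd (i + 1) c rest := by
        rw [pvBnd, if_pos h]
      rw [pvEmit, if_neg h, hb, pvPout, ih, h1, h2]

-- ===== VERDICT (by name: the statement is the Claim_ definition above) =====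
theorem solution_518_1_spec : Claim_equal_solution_518_1 := by
  intro s _
  unfold Spec_solution_518_1 solution_518_1 solution_518_1_alt
  have hcs : (s ++ " ").toList = s.toList ++ [' '] := by simp
  rw [hcs]
  obtain ⟨c0, rest, hc⟩ : ∃ c0 rest, s.toList ++ [' '] = c0 :: rest := by
    cases h : s.toList with
    | nil => exact ⟨' ', [], by simp⟩
    | cons a t => exact ⟨a, t ++ [' '], by simp⟩
  rw [hc]
  simp only [List.headD_cons, List.tail_cons]
  rw [pvFoldlA, pvZipFilt, pvZipPout, pvCore]
  have hb : pvBnd 0 c0 (c0 :: rest) = pvBnd 1 c0 rest := by simp [pvBnd]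
  rw [hb]
  norm_num
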